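-- pv_equiv track=rewrite | github.com/pmbaumgartner/remerge-mwe | scripts/mwe_eval/match.py | _decode_longest_per_start
-- ===== SOURCE A (Python) =====
-- def _decode_longest_per_start(spans: set[tuple[int, int]]) -> set[tuple[int, int]]:
--     best_by_start: dict[int, tuple[int, int]] = {}
--     for start, end in spans:
--         current = best_by_start.get(start)
--         length = end - start
--         if current is None:
--             best_by_start[start] = (start, end)
--             continue
--         current_length = current[1] - current[0]
--         if length > current_length or (length == current_length and end > current[1]):
--             best_by_start[start] = (start, end)
--     return set(best_by_start.values())
-- ===== SOURCE B (Python) =====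
-- def _decode_longest_per_start(spans: "set[tuple[int, int]]") -> "set[tuple[int, int]]":
--     # Group all end positions per start, then reduce each group with max.
--     ends_by_start: dict = {}
--     for start, end in spans:
--         ends_by_start.setdefault(start, []).append(end)
--     return {(start, max(ends)) for start, ends in ends_by_start.items()}
-- ===== Notes on version B (the rewrite author's own statement) =====
-- stated objective: alternative
-- what changed: B replaces A's streaming keep-the-best-span-per-start scan (compare each span against the stored best and conditionally overwrite) with a group-then-reduce pass: collect every end per start into a dict of lists, then take max(ends) per group.
import Mathlib
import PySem

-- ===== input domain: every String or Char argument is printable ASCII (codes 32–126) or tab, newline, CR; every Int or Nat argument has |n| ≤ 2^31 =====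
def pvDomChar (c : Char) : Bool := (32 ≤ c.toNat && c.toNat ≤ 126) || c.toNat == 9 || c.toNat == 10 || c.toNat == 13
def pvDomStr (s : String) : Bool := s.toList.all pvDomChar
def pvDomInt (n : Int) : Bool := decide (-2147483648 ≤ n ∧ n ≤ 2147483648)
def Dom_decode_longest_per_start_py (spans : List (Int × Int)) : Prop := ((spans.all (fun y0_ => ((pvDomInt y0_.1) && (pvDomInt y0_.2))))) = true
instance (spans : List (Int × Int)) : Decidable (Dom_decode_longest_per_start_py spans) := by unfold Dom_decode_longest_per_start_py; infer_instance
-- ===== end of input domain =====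

-- B groups all ends per start and reduces each group with max, instead of A's streaming best-so-far comparison; same cost, different decomposition.
-- Both ports return a PySem.Set (Python set); the equivalence below is equality of the representative lists.

-- ===== PORT A =====
-- loop body of A's 'for start, end in spans'
def pvStepA (d : PySem.Dict Int (Int × Int)) (p : Int × Int) : PySem.Dict Int (Int × Int) :=
  let start := p.1
  let e := p.2
  let current := d.get? start
  let length := e - start
  match current with
  | none => d.insert start (start, e)
  | some current =>
    let current_length := current.2 - current.1
    if length > current_length ∨ (length = current_length ∧ e > current.2)
    then d.insert start (start, e) else d

def decode_longest_per_start_py (spans : List (Int × Int)) : List (Int × Int) :=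
  let best_by_start := spans.foldl pvStepA PySem.Dict.empty
  PySem.Set.ofList best_by_start.values

-- ===== PORT B =====
-- loop body of B's grouping loop: ends_by_start.setdefault(start, []).append(end)
def pvStepB (d : PySem.Dict Int (List Int)) (p : Int × Int) : PySem.Dict Int (List Int) :=
  d.modify p.1 [] (· ++ [p.2])

def decode_longest_per_start_py_alt (spans : List (Int × Int)) : List (Int × Int) :=
  let ends_by_start := spans.foldl pvStepB PySem.Dict.empty
  -- max(ends): each group is nonempty by construction, so the .getD default is never used
  PySem.Set.ofList (ends_by_start.items.map
    (fun kv => (kv.1, (PySem.List.max? kv.2 (fun x => x)).getD 0)))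

-- ===== PRECONDITION & SPEC =====
def Spec_decode_longest_per_start_py (spans : List (Int × Int)) (out : List (Int × Int)) : Prop := out = decode_longest_per_start_py_alt spans
instance (spans : List (Int × Int)) (out : List (Int × Int)) : Decidable (Spec_decode_longest_per_start_py spans out) := by unfold Spec_decode_longest_per_start_py; infer_instance

-- ===== CLAIM (what is proved, stated in full; the proofs are below) =====
def Claim_equal_decode_longest_per_start_py : Prop := ∀ (spans : List (Int × Int)), Dom_decode_longest_per_start_py spans → Spec_decode_longest_per_start_py spans (decode_longest_per_start_py spans)

-- ===== LEMMAS AND PROOFS =====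

-- ends of all spans with start s, in order
def pvEndsOf (l : List (Int × Int)) (s : Int) : List Int :=
  (l.filter (fun p => p.1 == s)).map (·.2)

-- running maximum of A's loop, as an Option (none = start unseen)
def pvRunMax (o : Option Int) (es : List Int) : Option Int :=
  es.foldl (fun o e => match o with | none => some e | some m => some (max m e)) o

-- invariant of A's dict: every stored value carries its key as first component
def pvSane (d : PySem.Dict Int (Int × Int)) : Prop :=
  ∀ k v, d.get? k = some v → v.1 = k

lemma pvStepA_sane (d : PySem.Dict Int (Int × Int)) (p : Int × Int) (h : pvSane d) :
    pvSane (pvStepA d p) := by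
  intro k v hv
  simp only [pvStepA] at hv
  cases hc : d.get? p.1 with
  | none =>
    rw [hc] at hv
    rw [PySem.Dict.get?_insert] at hv
    split_ifs at hv with hk
    · cases hv; exact hk.symm ▸ rfl
    · exact h k v hv
  | some c =>
    rw [hc] at hv
    dsimp only at hv
    split_ifs at hv with hcond
    · rw [PySem.Dict.get?_insert] at hv
      split_ifs at hv with hk
      · cases hv; exact hk.symm ▸ rfl
      · exact h k v hv
    · exact h k v hv

lemma pvStepA_get?_ne (d : PySem.Dict Int (Int × Int)) (p : Int × Int) (s : Int)
    (hne : s ≠ p.1) : (pvStepA d p).get? s = d.get? s := by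
  simp only [pvStepA]
  cases hc : d.get? p.1 with
  | none => dsimp only; rw [PySem.Dict.get?_insert]; simp [hne]
  | some c =>
    dsimp only
    split_ifs with hcond
    · rw [PySem.Dict.get?_insert]; simp [hne]
    · rfl

lemma pvRunMax_some (t : List Int) (m : Int) : pvRunMax (some m) t = some (t.foldl max m) := by
  induction t generalizing m with
  | nil => rfl
  | cons e es ih => simpa [pvRunMax, List.foldl_cons] using ih (max m e)

lemma pvFoldA_get? (l : List (Int × Int)) (d : PySem.Dict Int (Int × Int)) (h : pvSane d)
    (s : Int) :
    (l.foldl pvStepA d).get? s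
      = (pvRunMax ((d.get? s).map (·.2)) (pvEndsOf l s)).map (fun m => (s, m)) := by
  induction l generalizing d with
  | nil =>
    simp only [List.foldl_nil, pvEndsOf, List.filter_nil, List.map_nil, pvRunMax,
      List.foldl_nil]
    cases hc : d.get? s with
    | none => rfl
    | some v =>
      have hv1 : v.1 = s := h s v hc
      simp [← hv1]
  | cons p t ih =>
    obtain ⟨a, e⟩ := p
    rw [List.foldl_cons, ih _ (pvStepA_sane d (a, e) h)]
    congr 1
    by_cases hps : a = s
    · subst hps
      have hends : pvEndsOf ((a, e) :: t) a = e :: pvEndsOf t a := by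
        simp [pvEndsOf]
      rw [hends]
      have hrm : ∀ (o : Option Int) (es : List Int) (e : Int),
          pvRunMax o (e :: es)
            = pvRunMax (match o with | none => some e | some m => some (max m e)) es := by
        intro o es e; rfl
      rw [hrm]
      congr 1
      cases hc : d.get? a with
      | none =>
        simp [pvStepA, hc]
      | some c =>
        have hc1 : c.1 = a := h a c hc
        simp only [pvStepA, hc]
        split_ifs with hcond
        · have hlt : c.2 < e := by
            rcases hcond with h1 | ⟨h1, h2⟩
            · omega
            · omega
          simp [Option.map, max_eq_right (le_of_lt hlt)]
        · have hle : e ≤ c.2 := by omega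
          simp [hc, Option.map, max_eq_left hle]
    · have hne : s ≠ a := fun hh => hps hh.symm
      have hends : pvEndsOf ((a, e) :: t) s = pvEndsOf t s := by
        simp [pvEndsOf, hps]
      rw [hends, pvStepA_get?_ne d (a, e) s hne]

lemma pvStepA_keys (d : PySem.Dict Int (Int × Int)) (p : Int × Int) :
    (pvStepA d p).keys = PySem.Set.add d.keys p.1 := by
  cases hc : d.get? p.1 with
  | none =>
    have hcont : d.contains p.1 = false := by
      rw [PySem.Dict.contains_eq_isSome_get?, hc]; rfl
    have hmem : p.1 ∉ d.keys := by
      rw [← PySem.Dict.contains_iff_mem_keys]; simp [hcont]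
    simp [pvStepA, hc, PySem.Dict.keys_insert_of_not_contains _ _ hcont, PySem.Set.add, hmem]
  | some c =>
    have hcont : d.contains p.1 = true := by
      rw [PySem.Dict.contains_eq_isSome_get?, hc]; rfl
    have hmem : p.1 ∈ d.keys := (PySem.Dict.contains_iff_mem_keys _ _).mp hcont
    simp only [pvStepA, hc]
    split_ifs with hcond <;>
      simp [PySem.Dict.keys_insert_of_contains _ _ hcont, PySem.Set.add, hmem]

lemma pvFoldA_keys (l : List (Int × Int)) (d : PySem.Dict Int (Int × Int)) :
    (l.foldl pvStepA d).keys = PySem.Set.update d.keys (l.map (·.1)) := by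
  induction l generalizing d with
  | nil => simp [PySem.Set.update]
  | cons p t ih =>
    rw [List.foldl_cons, ih, pvStepA_keys]
    simp [PySem.Set.update]

-- ===== VERDICT (by name: the statement is the Claim_ definition above) =====
theorem decode_longest_per_start_py_spec : Claim_equal_decode_longest_per_start_py := by
  unfold Claim_equal_decode_longest_per_start_py
  intro spans _
  unfold Spec_decode_longest_per_start_py decode_longest_per_start_py
    decode_longest_per_start_py_alt
  change PySem.Set.ofList (spans.foldl pvStepA PySem.Dict.empty).values
      = PySem.Set.ofList ((spans.foldl pvStepB PySem.Dict.empty).items.map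
          (fun kv => (kv.1, (PySem.List.max? kv.2 (fun x => x)).getD 0)))
  -- B side: items of the grouping dict
  have hBfold : spans.foldl pvStepB PySem.Dict.empty
      = spans.foldl (fun d p => d.modify p.1 [] (· ++ [p.2])) PySem.Dict.empty := rfl
  have hBkeys : (spans.foldl pvStepB PySem.Dict.empty).keys
      = PySem.Set.ofList (spans.map (·.1)) := by
    rw [hBfold]
    rw [show (fun (d : PySem.Dict Int (List Int)) (p : Int × Int) =>
          d.modify p.1 [] (· ++ [p.2]))
        = (fun d p => d.modify ((·.1) p) [] ((fun (_ : PySem.Dict Int (List Int))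
            (x : Int × Int) (l : List Int) => l ++ [x.2]) d p)) from rfl]
    rw [PySem.Dict.keys_foldl_modify_key]
    rw [PySem.Dict.keys_empty, PySem.Set.update_nil_left]
  have hBnodup : (spans.foldl pvStepB PySem.Dict.empty).keys.Nodup := by
    rw [hBkeys]; exact PySem.Set.nodup_ofList _
  have hBgetD : ∀ s : Int,
      (spans.foldl pvStepB PySem.Dict.empty).getD s [] = pvEndsOf spans s := by
    intro s
    rw [hBfold, PySem.Dict.getD_foldl_modify_append]
    simp [pvEndsOf, PySem.Dict.getD_eq_get?_getD, PySem.Dict.get?_empty]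
  have hBitems : (spans.foldl pvStepB PySem.Dict.empty).items
      = (PySem.Set.ofList (spans.map (·.1))).map (fun k =>
          (k, (spans.foldl pvStepB PySem.Dict.empty).getD k [])) := by
    rw [PySem.Dict.items_eq_map_keys _ hBnodup [], hBkeys]
  -- A side: keys and values of the best-per-start dict
  have hAkeys : (spans.foldl pvStepA PySem.Dict.empty).keys
      = PySem.Set.ofList (spans.map (·.1)) := by
    rw [pvFoldA_keys, PySem.Dict.keys_empty, PySem.Set.update_nil_left]
  have hAnodup : (spans.foldl pvStepA PySem.Dict.empty).keys.Nodup := by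
    rw [hAkeys]; exact PySem.Set.nodup_ofList _
  have hsane : pvSane (PySem.Dict.empty : PySem.Dict Int (Int × Int)) := by
    intro k v hv; rw [PySem.Dict.get?_empty] at hv; cases hv
  have hAvals : (spans.foldl pvStepA PySem.Dict.empty).values
      = (PySem.Set.ofList (spans.map (·.1))).map (fun k =>
          (spans.foldl pvStepA PySem.Dict.empty).getD k (0, 0)) := by
    rw [PySem.Dict.values_eq_map_keys _ hAnodup (0, 0), hAkeys]
  rw [hAvals, hBitems, List.map_map]
  congr 1
  apply List.map_congr_left
  intro k hk
  have hk' : k ∈ spans.map (·.1) := (PySem.Set.mem_ofList _ _).mp hk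
  obtain ⟨p, hp, hpk⟩ := List.mem_map.mp hk'
  have hne : pvEndsOf spans k ≠ [] := by
    intro hnil
    unfold pvEndsOf at hnil
    rw [List.map_eq_nil_iff, List.filter_eq_nil_iff] at hnil
    exact hnil p hp (by simp [hpk])
  cases hes : pvEndsOf spans k with
  | nil => exact absurd hes hne
  | cons e es =>
    have hget : (spans.foldl pvStepA PySem.Dict.empty).get? k
        = some (k, es.foldl max e) := by
      rw [pvFoldA_get? spans PySem.Dict.empty hsane k, PySem.Dict.get?_empty, hes]
      have h0 : Option.map (fun x : Int × Int => x.2) none = (none : Option Int) := rfl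
      rw [h0, show pvRunMax (none : Option Int) (e :: es) = pvRunMax (some e) es from rfl,
        pvRunMax_some]
      rfl
    rw [PySem.Dict.getD_eq_get?_getD, hget]
    simp [hBgetD, hes, PySem.List.max?_id_cons]
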